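-- pv_equiv track=rewrite | github.com/Suryam26/Competitive-coding | Topics/DP/max_partition_sum.py | maxPartition2
-- ===== SOURCE A (Python) =====
-- arr = [1, 15, 7, 9, 2, 5, 10]
--
-- def maxPartition2(n, k):
--     dp = [0 for i in range(n+1)]
--     dp[n] = 0
--
--     for i in range(n-1, -1, -1):
--         ans = float('-inf')
--         maxi, l = float('-inf'), 0
--         for j in range(i, min(n, i+k)):
--             l += 1
--             maxi = max(maxi, arr[j])
--             sum = l * maxi + dp[j+1]
--             ans = max(ans, sum)
--             dp[i] = ans
--
--     return dp[0]
-- ===== SOURCE B (Python) =====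
-- arr = [1, 15, 7, 9, 2, 5, 10]
--
-- def maxPartition2(n, k):
--     # recursive suffix decomposition: best partition of arr[:n] into blocks of size <= k
--     xs = arr[:n]
--     if not xs or k <= 0:
--         return 0
--     return _extend(k, 1, xs[0], xs[1:])
--
-- def _extend(k, l, maxi, rest):
--     # current block has length l and maximum maxi; rest is the untouched suffix
--     if not rest:
--         return l * maxi
--     cand = l * maxi + _extend(k, 1, rest[0], rest[1:])
--     if l < k:
--         return max(cand, _extend(k, l + 1, max(maxi, rest[0]), rest[1:]))
--     return cand
-- ===== Notes on version B (the rewrite author's own statement) =====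
-- stated objective: alternative
-- what changed: Replaces A's bottom-up dp table (backward outer loop filling dp[i] from an inner running-max loop) with a top-down recursive suffix decomposition: extend the current block or close it and recurse on the rest of the array.
-- outside the precondition, e.g. on maxPartition2(-1, 3): A raises IndexError, B returns 72; on maxPartition2(8, 1): A raises IndexError, B returns 49
import Mathlib
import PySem

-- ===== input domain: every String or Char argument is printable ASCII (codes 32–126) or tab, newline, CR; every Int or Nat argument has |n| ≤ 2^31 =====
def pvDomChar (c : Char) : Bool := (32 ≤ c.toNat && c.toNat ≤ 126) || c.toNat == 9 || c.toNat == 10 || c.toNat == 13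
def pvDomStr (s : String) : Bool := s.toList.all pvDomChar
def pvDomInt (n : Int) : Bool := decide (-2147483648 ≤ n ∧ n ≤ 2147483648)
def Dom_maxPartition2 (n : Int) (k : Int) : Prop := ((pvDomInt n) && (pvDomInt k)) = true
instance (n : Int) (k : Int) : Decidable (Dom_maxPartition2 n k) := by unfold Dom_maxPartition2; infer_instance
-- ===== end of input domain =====

-- B is an alternative decomposition of the same exact computation: top-down recursion on the
-- suffix of arr instead of A's bottom-up dp table (objective: alternative; no speed claim).

-- the module-global 'arr' both Pythons read
def pvArr : List Int := [1, 15, 7, 9, 2, 5, 10]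

-- ===== PORT A =====
-- body of A's inner loop over j (state: ans, maxi — Option models float('-inf') —, l, dp)
def aStep (i : Int) (st : Option Int × Option Int × Int × List Int) (j : Int) :
    Option Int × Option Int × Int × List Int :=
  let (ans, maxi, l, dp) := st
  let l := l + 1
  let aj := (PySem.List.pyGet? pvArr j).getD 0
  let maxi' : Int := match maxi with | none => aj | some m => max m aj
  let sum := l * maxi' + (PySem.List.pyGet? dp (j + 1)).getD 0
  let ans' : Int := match ans with | none => sum | some a => max a sum
  (some ans', some maxi', l, dp.set i.toNat ans')

-- body of A's outer loop over i
def aOuter (n : Int) (k : Int) (dp : List Int) (i : Int) : List Int :=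
  ((PySem.List.pyRange i (min n (i + k)) 1).foldl (aStep i) (none, none, 0, dp)).2.2.2

def maxPartition2 (n : Int) (k : Int) : Int :=
  (PySem.List.pyGet?
    ((PySem.List.pyRange (n - 1) (-1) (-1)).foldl (aOuter n k)
      (((List.range (n + 1).toNat).map (fun _ => (0 : Int))).set n.toNat 0)) 0).getD 0

-- ===== PORT B =====
-- current block has length l and maximum maxi; rest is the untouched suffix
def bExtend (k : Int) (l : Int) (maxi : Int) : List Int → Int
  | [] => l * maxi
  | y :: rest' =>
    let cand := l * maxi + bExtend k 1 y rest'
    if l < k then max cand (bExtend k (l + 1) (max maxi y) rest') else cand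

def maxPartition2_alt (n : Int) (k : Int) : Int :=
  match PySem.List.slice pvArr none (some n) with
  | [] => 0
  | x :: rest => if k ≤ 0 then 0 else bExtend k 1 x rest

-- ===== PRECONDITION & SPEC =====
-- Pre_ excludes exactly the inputs where A raises IndexError: negative n (dp[n] out of range)
-- and, when k ≥ 1, n > 7 (arr[j] out of range for the 7-element global arr).
def Pre_maxPartition2 (n : Int) (k : Int) : Prop := 0 ≤ n ∧ (k ≤ 0 ∨ n ≤ 7)
instance (n : Int) (k : Int) : Decidable (Pre_maxPartition2 n k) := by
  unfold Pre_maxPartition2; infer_instance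

def pvWitness_maxPartition2 : Int × Int := (7, 3)

def Spec_maxPartition2 (n : Int) (k : Int) (out : Int) : Prop := out = maxPartition2_alt n k
instance (n : Int) (k : Int) (out : Int) : Decidable (Spec_maxPartition2 n k out) := by
  unfold Spec_maxPartition2; infer_instance

-- ===== CLAIM (what is proved, stated in full; the proofs are below) =====
def Claim_equal_maxPartition2 : Prop := ∀ (n : Int) (k : Int), Dom_maxPartition2 n k →
  Pre_maxPartition2 n k → Spec_maxPartition2 n k (maxPartition2 n k)

-- ===== LEMMAS AND PROOFS =====

-- k ≤ 0: A's inner range is empty, so dp stays all zeros and dp[0] = 0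
lemma aOuter_id (n k : Int) (hk : k ≤ 0) (dp : List Int) (i : Int) : aOuter n k dp i = dp := by
  unfold aOuter
  rw [PySem.List.pyRange_one_eq_nil (by omega)]
  rfl

lemma A_k_nonpos (n k : Int) (hn : 0 ≤ n) (hk : k ≤ 0) : maxPartition2 n k = 0 := by
  unfold maxPartition2
  rw [PySem.List.foldl_congr_mem _ _ (fun dp _ => dp) _
        (fun dp i _ => aOuter_id n k hk dp i),
      List.foldl_fixed]
  rw [List.map_const', List.set_replicate_self]
  simp [PySem.List.pyGet?, PySem.List.pyIdx?, hn, List.getElem?_replicate]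

lemma B_k_nonpos (n k : Int) (hk : k ≤ 0) : maxPartition2_alt n k = 0 := by
  unfold maxPartition2_alt
  cases PySem.List.slice pvArr none (some n) with
  | nil => rfl
  | cons x rest => simp [hk]

-- A's result does not depend on k once k covers the whole array (min n (i+k) = n for i ≥ 0)
lemma A_stable (n k k' : Int) (h : n ≤ k) (h' : n ≤ k') :
    maxPartition2 n k = maxPartition2 n k' := by
  unfold maxPartition2
  rw [PySem.List.foldl_congr_mem _ _ (aOuter n k') _ (fun dp i hi => ?_)]
  have hi0 : 0 ≤ i := by
    rcases (PySem.List.mem_pyRange_neg_one).1 hi with ⟨h1, _⟩; omega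
  unfold aOuter
  have hmin : min n (i + k) = min n (i + k') := by omega
  rw [hmin]

-- B's result does not depend on k once k covers the whole block budget
lemma bExtend_stable (rest : List Int) : ∀ (k k' l maxi : Int), 1 ≤ l →
    (rest.length : Int) + l ≤ k → (rest.length : Int) + l ≤ k' →
    bExtend k l maxi rest = bExtend k' l maxi rest := by
  induction rest with
  | nil => intro k k' l maxi _ _ _; rfl
  | cons y rest' ih =>
    intro k k' l maxi hl hk hk'
    simp only [List.length_cons] at hk hk'
    push_cast at hk hk'
    simp only [bExtend, if_pos (by omega : l < k), if_pos (by omega : l < k')]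
    rw [ih k k' 1 y (by omega) (by omega) (by omega),
        ih k k' (l + 1) (max maxi y) (by omega) (by omega) (by omega)]

lemma B_stable (n k k' : Int) (hn : 0 ≤ n) (_hn7 : n ≤ 7) (h : 8 ≤ k) (h' : 8 ≤ k') :
    maxPartition2_alt n k = maxPartition2_alt n k' := by
  unfold maxPartition2_alt
  have hlen : ((PySem.List.slice pvArr none (some n)).length : Int) ≤ 7 := by
    rw [PySem.List.slice_to pvArr hn]
    have hp : pvArr.length = 7 := by decide
    have h3 : (List.take n.toNat pvArr).length = min n.toNat pvArr.length := List.length_take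
    omega
  cases hx : PySem.List.slice pvArr none (some n) with
  | nil => rfl
  | cons x rest =>
    rw [hx] at hlen
    simp only [List.length_cons] at hlen
    push_cast at hlen
    simp only [if_neg (by omega : ¬ k ≤ 0), if_neg (by omega : ¬ k' ≤ 0)]
    exact bExtend_stable rest k k' 1 x (by omega) (by omega) (by omega)

-- the finite grid 0 ≤ n ≤ 7, 1 ≤ k ≤ 8 where both programs read the same prefix of arr
lemma grid (n k : Int) (hn0 : 0 ≤ n) (hn7 : n ≤ 7) (hk1 : 1 ≤ k) (hk8 : k ≤ 8) :
    maxPartition2 n k = maxPartition2_alt n k := by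
  interval_cases n <;> interval_cases k <;> decide

-- ===== VERDICT (by name: the statement is the Claim_ definition above) =====
theorem maxPartition2_spec : Claim_equal_maxPartition2 := by
  intro n k _ hpre
  rcases hpre with ⟨hn, hk⟩
  unfold Spec_maxPartition2
  by_cases hk0 : k ≤ 0
  · rw [A_k_nonpos n k hn hk0, B_k_nonpos n k hk0]
  · have hn7 : n ≤ 7 := by rcases hk with h | h; omega; exact h
    by_cases hk8 : k ≤ 8
    · exact grid n k hn hn7 (by omega) hk8
    · rw [A_stable n k 8 (by omega) (by omega), B_stable n k 8 hn hn7 (by omega) (by omega)]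
      exact grid n 8 hn hn7 (by omega) (by omega)
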